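-- pv_equiv track=rewrite | github.com/shubhamchandak94/HARC | DUDEBEC.py | DUDEBEC
-- ===== SOURCE A (Python) =====
-- def DUDEBEC(Z,k):
--
--     n = len(Z)
--     Y = [0]*n
--
--     #first and last k symbols
--     for i in range(k):
--       if Z[i] == 2:
--         Y[i] = 0
--       else:
--         Y[i] = Z[i]
--
--
--     for i in range(n-k,n):
--       if Z[i] == 2:
--         Y[i] = 0
--       else:
--         Y[i] = Z[i]
--
--
--     #generating counts
--     d = {}
--     for i in range(k,n-k):
--         l = Z[i-k:i-1]+Z[i+1:i+k]
--         s = ''.join([str(j) for j in l])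
--         if s in d:
--             if Z[i] == 0:
--                 d[s][0]+=1
--             elif Z[i] == 1:
--                 d[s][1]+=1
--         else:
--             if Z[i] == 0:
--                 d[s] = [1,0]
--             elif Z[i] == 1:
--                 d[s] = [0,1]
--             else:
--                 d[s] = [0,0]
--
--     for i in range(k,n-k):
--         if Z[i] == 2:
--             l = Z[i-k:i-1]+Z[i+1:i+k]
--             s = ''.join([str(j) for j in l])
--             if d[s][1] > d[s][0]:
--                 Y[i] = 1
--             else:
--                 Y[i] = 0
--         else:
--             Y[i] = Z[i]
--     return Y
-- ===== SOURCE B (Python) =====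
-- def DUDEBEC(Z, k):
--     n = len(Z)
--     lo, hi = k, n - k
--     # boundaries cleaned (erasure -> 0), interior prefilled with Z[i]
--     Y = [0 if (v == 2 and not (lo <= i < hi)) else v for i, v in enumerate(Z)]
--     # no dict: precompute each interior position's context string once, then
--     # answer every erased position by a direct majority scan over the interior
--     ctx = [''.join([str(v) for v in Z[i-k:i-1] + Z[i+1:i+k]]) for i in range(lo, hi)]
--     sym = Z[lo:hi]
--     for i, s in zip(range(lo, hi), ctx):
--         if Z[i] == 2:
--             ones = sum(1 for p in zip(ctx, sym) if p[0] == s and p[1] == 1)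
--             zeros = sum(1 for p in zip(ctx, sym) if p[0] == s and p[1] == 0)
--             Y[i] = 1 if ones > zeros else 0
--     return Y
-- ===== Notes on version B (the rewrite author's own statement) =====
-- stated objective: alternative
-- what changed: B uses no dictionary at all: it prefills Y (boundaries cleaned, interior copied), precomputes each interior context string once, and resolves every erased position by a direct linear majority count over the interior (two 0/1-sums per erasure), instead of A's two staged passes that build and then query a context->counts dict.
import Mathlib
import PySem

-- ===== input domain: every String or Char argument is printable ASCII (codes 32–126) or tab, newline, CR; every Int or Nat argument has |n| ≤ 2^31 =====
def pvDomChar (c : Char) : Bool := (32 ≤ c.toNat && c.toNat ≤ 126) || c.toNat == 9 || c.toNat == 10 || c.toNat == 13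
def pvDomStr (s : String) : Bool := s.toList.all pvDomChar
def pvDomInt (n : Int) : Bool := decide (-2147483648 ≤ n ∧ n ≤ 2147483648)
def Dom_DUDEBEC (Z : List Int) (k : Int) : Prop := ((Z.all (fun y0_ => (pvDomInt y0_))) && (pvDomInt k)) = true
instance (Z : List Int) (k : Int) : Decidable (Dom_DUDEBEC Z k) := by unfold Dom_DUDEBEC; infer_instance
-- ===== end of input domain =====

-- B drops A's dict entirely: it prefills Y, precomputes the interior context strings
-- once, and resolves each erased position by a direct majority count over the interior
-- (objective: alternative — a scan-per-erasure algorithm instead of A's two-pass dict of counts).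

-- ===== PORT A =====
-- ''.join([str(j) for j in Z[i-k:i-1]+Z[i+1:i+k]]) — the context string of position i
-- (both Pythons compute this same expression, so both ports share this helper)
def pvCtx (Z : List Int) (k i : Int) : String :=
  PySem.Str.join "" (((PySem.List.slice Z (some (i - k)) (some (i - 1))) ++
                      (PySem.List.slice Z (some (i + 1)) (some (i + k)))).map PySem.Int.toStr)

-- the body of A's counting loop ('generating counts'); d[s] is a two-element list [c0, c1]
def pvStepA (Z : List Int) (k : Int) (d : PySem.Dict String (List Int)) (i : Int) :
    PySem.Dict String (List Int) :=
  let s := pvCtx Z k i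
  if d.contains s then
    if PySem.List.pyGetD Z i 0 = 0 then
      d.modify s [] (fun v => PySem.List.pySetD v 0 (PySem.List.pyGetD v 0 0 + 1))
    else if PySem.List.pyGetD Z i 0 = 1 then
      d.modify s [] (fun v => PySem.List.pySetD v 1 (PySem.List.pyGetD v 1 0 + 1))
    else d
  else
    if PySem.List.pyGetD Z i 0 = 0 then d.insert s [1, 0]
    else if PySem.List.pyGetD Z i 0 = 1 then d.insert s [0, 1]
    else d.insert s [0, 0]

-- A's dict d after the counting loop
def pvDA (Z : List Int) (k : Int) : PySem.Dict String (List Int) :=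
  (PySem.List.pyRange k ((Z.length : Int) - k) 1).foldl (pvStepA Z k) PySem.Dict.empty

def DUDEBEC (Z : List Int) (k : Int) : List Int :=
  let n : Int := (Z.length : Int)
  let Y : List Int := List.replicate Z.length 0
  -- first and last k symbols
  let Y := (PySem.List.pyRange 0 k 1).foldl (fun Y i =>
      if PySem.List.pyGetD Z i 0 = 2 then PySem.List.pySetD Y i 0
      else PySem.List.pySetD Y i (PySem.List.pyGetD Z i 0)) Y
  let Y := (PySem.List.pyRange (n - k) n 1).foldl (fun Y i =>
      if PySem.List.pyGetD Z i 0 = 2 then PySem.List.pySetD Y i 0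
      else PySem.List.pySetD Y i (PySem.List.pyGetD Z i 0)) Y
  -- generating counts
  let d := pvDA Z k
  -- decoding pass; Python's d[s] is ported as getD s [] — inside Pre_ the key is always present
  let Y := (PySem.List.pyRange k (n - k) 1).foldl (fun Y i =>
      if PySem.List.pyGetD Z i 0 = 2 then
        let s := pvCtx Z k i
        let v := d.getD s []
        if PySem.List.pyGetD v 1 0 > PySem.List.pyGetD v 0 0 then PySem.List.pySetD Y i 1
        else PySem.List.pySetD Y i 0
      else PySem.List.pySetD Y i (PySem.List.pyGetD Z i 0)) Y
  Y

-- ===== PORT B =====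
def DUDEBEC_alt (Z : List Int) (k : Int) : List Int :=
  let n : Int := (Z.length : Int)
  let lo := k
  let hi := n - k
  -- boundaries cleaned (erasure -> 0), interior prefilled with Z[i]
  let Y : List Int := (PySem.List.enumerate Z 0).map (fun p =>
      if p.2 = 2 ∧ ¬ (lo ≤ p.1 ∧ p.1 < hi) then 0 else p.2)
  -- no dict: each interior position's context string, computed once
  let ctx : List String := (PySem.List.pyRange lo hi 1).map (pvCtx Z k)
  let sym : List Int := PySem.List.slice Z (some lo) (some hi)
  -- per erased position, a direct majority count over the interior (the 0/1-sums are countP)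
  ((PySem.List.pyRange lo hi 1).zip ctx).foldl (fun Y p =>
      if PySem.List.pyGetD Z p.1 0 = 2 then
        let ones : Int := ((ctx.zip sym).countP (fun q => q.1 == p.2 && q.2 == 1) : Int)
        let zeros : Int := ((ctx.zip sym).countP (fun q => q.1 == p.2 && q.2 == 0) : Int)
        PySem.List.pySetD Y p.1 (if ones > zeros then 1 else 0)
      else Y) Y

-- ===== PRECONDITION & SPEC =====
-- exactly the inputs on which the Python A returns (k < 0 or k > len(Z) raise IndexError)
def Pre_DUDEBEC (Z : List Int) (k : Int) : Prop := 0 ≤ k ∧ k ≤ (Z.length : Int)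
instance (Z : List Int) (k : Int) : Decidable (Pre_DUDEBEC Z k) := by unfold Pre_DUDEBEC; infer_instance

def pvWitness_DUDEBEC : List Int × Int := ([0, 2, 1, 0, 1], 1)

def Spec_DUDEBEC (Z : List Int) (k : Int) (out : List Int) : Prop := out = DUDEBEC_alt Z k
instance (Z : List Int) (k : Int) (out : List Int) : Decidable (Spec_DUDEBEC Z k out) := by unfold Spec_DUDEBEC; infer_instance

-- ===== CLAIM (what is proved, stated in full; the proofs are below) =====
def Claim_equal_DUDEBEC : Prop := ∀ (Z : List Int) (k : Int), Dom_DUDEBEC Z k → Pre_DUDEBEC Z k → Spec_DUDEBEC Z k (DUDEBEC Z k)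

-- ===== LEMMAS AND PROOFS =====

-- Z[j] (total form; all uses are in range inside Pre_)
def pvZ (Z : List Int) (j : Int) : Int := PySem.List.pyGetD Z j 0

-- number of positions in L whose context is s and whose symbol is 0 (resp. 1)
def pvCnt0 (Z : List Int) (k : Int) (L : List Int) (s : String) : Int :=
  (L.countP (fun j => pvCtx Z k j == s && pvZ Z j == 0) : Int)
def pvCnt1 (Z : List Int) (k : Int) (L : List Int) (s : String) : Int :=
  (L.countP (fun j => pvCtx Z k j == s && pvZ Z j == 1) : Int)

-- a fold writing g i at each position i of L
def pvSetFold (g : Int → Int) (L : List Int) (Y : List Int) : List Int :=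
  L.foldl (fun Y i => PySem.List.pySetD Y i (g i)) Y

-- the value A's boundary loops write at i
def pvG0 (Z : List Int) (i : Int) : Int := if pvZ Z i = 2 then 0 else pvZ Z i
-- the majority bit A reads off its dict for context s
def pvMajA (Z : List Int) (k : Int) (s : String) : Int :=
  if PySem.List.pyGetD ((pvDA Z k).getD s []) 1 0 > PySem.List.pyGetD ((pvDA Z k).getD s []) 0 0
  then 1 else 0
-- the value A's decoding loop writes at i
def pvGA (Z : List Int) (k : Int) (i : Int) : Int :=
  if pvZ Z i = 2 then pvMajA Z k (pvCtx Z k i) else pvZ Z i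
-- the value B writes at an erased position j: the counted majority bit
def pvGB (Z : List Int) (k : Int) (j : Int) : Int :=
  if pvCnt1 Z k (PySem.List.pyRange k ((Z.length : Int) - k) 1) (pvCtx Z k j) >
     pvCnt0 Z k (PySem.List.pyRange k ((Z.length : Int) - k) 1) (pvCtx Z k j)
  then 1 else 0

lemma pvSetFold_length (g : Int → Int) : ∀ (L : List Int) (Y : List Int),
    (pvSetFold g L Y).length = Y.length := by
  intro L
  induction L with
  | nil => intro Y; rfl
  | cons i L ih =>
    intro Y
    simp only [pvSetFold, List.foldl_cons] at *
    rw [ih]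
    simp [PySem.List.length_pySetD]

lemma pvSetFold_getElem? (g : Int → Int) : ∀ (L : List Int) (Y : List Int),
    (∀ i ∈ L, 0 ≤ i ∧ i < (Y.length : Int)) → ∀ m : Nat,
    (pvSetFold g L Y)[m]? = if (m : Int) ∈ L then some (g m) else Y[m]? := by
  intro L
  induction L with
  | nil => intro Y _ m; simp [pvSetFold]
  | cons i L ih =>
    intro Y hL m
    have hi := hL i (by simp)
    simp only [pvSetFold, List.foldl_cons]
    rw [PySem.List.pySetD_of_nonneg _ _ hi.1]
    have hlen : (Y.set i.toNat (g i)).length = Y.length := by simp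
    rw [show (L.foldl (fun Y i => PySem.List.pySetD Y i (g i)) (Y.set i.toNat (g i))) =
        pvSetFold g L (Y.set i.toNat (g i)) from rfl]
    rw [ih (Y.set i.toNat (g i)) (by intro j hj; rw [hlen]; exact hL j (by simp [hj])) m]
    by_cases hm : (m : Int) ∈ L
    · simp [hm, List.mem_cons]
    · by_cases hmi : (m : Int) = i
      · have : m = i.toNat := by omega
        subst this
        have hlt : i.toNat < Y.length := by omega
        rw [List.getElem?_set_self hlt]
        simp [List.mem_cons, hmi]
      · have : m ≠ i.toNat := by omega
        rw [List.getElem?_set_ne this.symm]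
        simp [hm, hmi, List.mem_cons]

lemma pvCnt0_cons (Z : List Int) (k j : Int) (L : List Int) (s : String) :
    pvCnt0 Z k (j :: L) s = pvCnt0 Z k L s + (if pvCtx Z k j = s ∧ pvZ Z j = 0 then 1 else 0) := by
  simp [pvCnt0, List.countP_cons]

lemma pvCnt1_cons (Z : List Int) (k j : Int) (L : List Int) (s : String) :
    pvCnt1 Z k (j :: L) s = pvCnt1 Z k L s + (if pvCtx Z k j = s ∧ pvZ Z j = 1 then 1 else 0) := by
  simp [pvCnt1, List.countP_cons]

-- a counting step at a different context leaves key s untouched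
lemma pvStepA_ne (Z : List Int) (k j : Int) (d : PySem.Dict String (List Int)) (s : String)
    (hs : pvCtx Z k j ≠ s) :
    (pvStepA Z k d j).contains s = d.contains s ∧ (pvStepA Z k d j).getD s [] = d.getD s [] := by
  unfold pvStepA
  by_cases hc : d.contains (pvCtx Z k j) = true <;> split_ifs <;>
    simp [hc, PySem.Dict.contains_modify, PySem.Dict.contains_insert,
      PySem.Dict.getD_modify_of_ne _ _ _ (Ne.symm hs), PySem.Dict.get?_insert_of_ne _ _ (Ne.symm hs),
      PySem.Dict.getD_eq_get?_getD, Ne.symm hs]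

-- A's counting loop computes, for each context string, the two-element list of 0/1-counts
lemma pvStepA_fold_getD (Z : List Int) (k : Int) : ∀ (L : List Int)
    (d : PySem.Dict String (List Int)) (s : String) (a b : Int),
    ((d.contains s = true ∧ d.getD s [] = [a, b]) ∨
     (d.contains s = false ∧ a = 0 ∧ b = 0 ∧ s ∈ L.map (pvCtx Z k))) →
    (L.foldl (pvStepA Z k) d).getD s [] = [a + pvCnt0 Z k L s, b + pvCnt1 Z k L s] := by
  intro L
  induction L with
  | nil =>
    intro d s a b h
    rcases h with ⟨_, hv⟩ | ⟨_, _, _, hmem⟩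
    · simpa [pvCnt0, pvCnt1] using hv
    · simp at hmem
  | cons j L ih =>
    intro d s a b h
    rw [List.foldl_cons, pvCnt0_cons, pvCnt1_cons]
    by_cases hs : pvCtx Z k j = s
    · rcases h with ⟨hc, hv⟩ | ⟨hc, ha, hb, _⟩
      · -- s already present with value [a, b]
        by_cases h0 : PySem.List.pyGetD Z j 0 = 0
        · have hstep : pvStepA Z k d j =
              d.modify s [] (fun v => PySem.List.pySetD v 0 (PySem.List.pyGetD v 0 0 + 1)) := by
            simp [pvStepA, hs, hc, h0]
          rw [hstep,
            ih _ s (a + 1) b (Or.inl ⟨by simp [PySem.Dict.contains_modify],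
              by rw [PySem.Dict.getD_modify_self, hv]; simp [pysem]⟩)]
          simp [hs, pvZ, h0]
          omega
        · by_cases h1 : PySem.List.pyGetD Z j 0 = 1
          · have hstep : pvStepA Z k d j =
                d.modify s [] (fun v => PySem.List.pySetD v 1 (PySem.List.pyGetD v 1 0 + 1)) := by
              simp [pvStepA, hs, hc, h1]
            rw [hstep,
              ih _ s a (b + 1) (Or.inl ⟨by simp [PySem.Dict.contains_modify],
                by rw [PySem.Dict.getD_modify_self, hv]; simp [pysem]⟩)]
            simp [hs, pvZ, h1]
            omega
          · have hstep : pvStepA Z k d j = d := by simp [pvStepA, hs, hc, h0, h1]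
            rw [hstep, ih _ s a b (Or.inl ⟨hc, hv⟩)]
            simp [hs, pvZ, h0, h1]
      · -- s absent: this step inserts it
        subst ha; subst hb
        by_cases h0 : PySem.List.pyGetD Z j 0 = 0
        · have hstep : pvStepA Z k d j = d.insert s [1, 0] := by simp [pvStepA, hs, hc, h0]
          rw [hstep,
            ih _ s 1 0 (Or.inl ⟨by simp,
              by simp [PySem.Dict.getD_eq_get?_getD, PySem.Dict.get?_insert_self]⟩)]
          simp [hs, pvZ, h0]
          omega
        · by_cases h1 : PySem.List.pyGetD Z j 0 = 1
          · have hstep : pvStepA Z k d j = d.insert s [0, 1] := by simp [pvStepA, hs, hc, h1]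
            rw [hstep,
              ih _ s 0 1 (Or.inl ⟨by simp,
                by simp [PySem.Dict.getD_eq_get?_getD, PySem.Dict.get?_insert_self]⟩)]
            simp [hs, pvZ, h1]
            omega
          · have hstep : pvStepA Z k d j = d.insert s [0, 0] := by simp [pvStepA, hs, hc, h0, h1]
            rw [hstep,
              ih _ s 0 0 (Or.inl ⟨by simp,
                by simp [PySem.Dict.getD_eq_get?_getD, PySem.Dict.get?_insert_self]⟩)]
            simp [hs, pvZ, h0, h1]
    · -- different context: the step does not affect key s
      obtain ⟨hcon, hval⟩ := pvStepA_ne Z k j d s hs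
      have h' : ((pvStepA Z k d j).contains s = true ∧ (pvStepA Z k d j).getD s [] = [a, b]) ∨
          ((pvStepA Z k d j).contains s = false ∧ a = 0 ∧ b = 0 ∧ s ∈ L.map (pvCtx Z k)) := by
        rcases h with ⟨hc, hv⟩ | ⟨hc, ha, hb, hmem⟩
        · exact Or.inl ⟨hcon.trans hc, hval.trans hv⟩
        · refine Or.inr ⟨hcon.trans hc, ha, hb, ?_⟩
          simp only [List.map_cons, List.mem_cons] at hmem
          exact hmem.resolve_left (by intro hx; exact hs hx.symm)
      rw [ih _ s a b h']
      simp [hs]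

-- A as a chain of position-writing folds
lemma DUDEBEC_eq (Z : List Int) (k : Int) : DUDEBEC Z k =
    pvSetFold (pvGA Z k) (PySem.List.pyRange k ((Z.length : Int) - k) 1)
      (pvSetFold (pvG0 Z) (PySem.List.pyRange ((Z.length : Int) - k) (Z.length : Int) 1)
        (pvSetFold (pvG0 Z) (PySem.List.pyRange 0 k 1) (List.replicate Z.length 0))) := by
  have hbody : ∀ (Y : List Int) (i : Int),
      (if PySem.List.pyGetD Z i 0 = 2 then PySem.List.pySetD Y i 0
       else PySem.List.pySetD Y i (PySem.List.pyGetD Z i 0)) =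
      PySem.List.pySetD Y i (pvG0 Z i) := by
    intro Y i; unfold pvG0 pvZ; split_ifs <;> rfl
  have hbodyA : ∀ (Y : List Int) (i : Int),
      (if PySem.List.pyGetD Z i 0 = 2 then
         if PySem.List.pyGetD ((pvDA Z k).getD (pvCtx Z k i) []) 1 0 >
            PySem.List.pyGetD ((pvDA Z k).getD (pvCtx Z k i) []) 0 0
         then PySem.List.pySetD Y i 1 else PySem.List.pySetD Y i 0
       else PySem.List.pySetD Y i (PySem.List.pyGetD Z i 0)) =
      PySem.List.pySetD Y i (pvGA Z k i) := by
    intro Y i; unfold pvGA pvMajA pvZ; split_ifs <;> rfl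
  simp only [DUDEBEC, pvSetFold, hbody, hbodyA]

-- zipping a list with its own map pairs each element with its image
lemma pvZipSelfMap {α β : Type} : ∀ (l : List α) (f : α → β),
    l.zip (l.map f) = l.map (fun a => (a, f a)) := by
  intro l f
  induction l with
  | nil => rfl
  | cons a l ih => simp [ih]

-- the interior slice Z[k:n-k] is the list of symbols of the interior positions
lemma pvSym_eq (Z : List Int) (k : Int) (hk0 : 0 ≤ k) (hkn : k ≤ (Z.length : Int)) :
    PySem.List.slice Z (some k) (some ((Z.length : Int) - k)) =
      (PySem.List.pyRange k ((Z.length : Int) - k) 1).map (pvZ Z) := by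
  rw [PySem.List.slice_toNat Z hk0 (by omega : (0:Int) ≤ (Z.length : Int) - k)]
  apply List.ext_getElem
  · simp [PySem.List.length_pyRange_one]
    omega
  · intro m h1 h2
    simp only [List.getElem_take, List.getElem_drop, List.getElem_map]
    rw [PySem.List.getElem_pyRange_one]
    unfold pvZ
    have hm : k.toNat + m < Z.length := by
      simp at h1; omega
    rw [show k + (m : Int) = ((k.toNat + m : Nat) : Int) by omega, PySem.List.pyGetD_natCast]
    simp [List.getD_eq_getElem?_getD, List.getElem?_eq_getElem hm]

-- a conditional-write fold is a plain write fold over the filtered list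
lemma pvFoldFilter (g : Int → Int) (p : Int → Prop) [DecidablePred p] : ∀ (L Y : List Int),
    L.foldl (fun Y j => if p j then PySem.List.pySetD Y j (g j) else Y) Y
      = pvSetFold g (L.filter (fun j => decide (p j))) Y := by
  intro L
  induction L with
  | nil => intro Y; rfl
  | cons j L ih =>
    intro Y
    rw [List.foldl_cons, List.filter_cons]
    by_cases hp : p j
    · simp only [hp, if_true]
      rw [ih]
      rfl
    · simp only [hp, if_false]
      rw [ih]
      rfl

-- B as one position-writing fold over the erased interior positions
lemma DUDEBEC_alt_eq (Z : List Int) (k : Int) (hk0 : 0 ≤ k) (hkn : k ≤ (Z.length : Int)) :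
    DUDEBEC_alt Z k =
    pvSetFold (pvGB Z k)
      ((PySem.List.pyRange k ((Z.length : Int) - k) 1).filter (fun j => decide (pvZ Z j = 2)))
      ((PySem.List.enumerate Z 0).map (fun p =>
        if p.2 = 2 ∧ ¬ (k ≤ p.1 ∧ p.1 < (Z.length : Int) - k) then 0 else p.2)) := by
  simp only [DUDEBEC_alt]
  rw [pvSym_eq Z k hk0 hkn, pvZipSelfMap, List.zip_map', List.foldl_map]
  have hbody : (fun (Y : List Int) (j : Int) =>
      if PySem.List.pyGetD Z j 0 = 2 then
        PySem.List.pySetD Y j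
          (if (((PySem.List.pyRange k ((Z.length : Int) - k) 1).map
                  (fun a => (pvCtx Z k a, pvZ Z a))).countP
                  (fun q => q.1 == pvCtx Z k j && q.2 == 1) : Int) >
              (((PySem.List.pyRange k ((Z.length : Int) - k) 1).map
                  (fun a => (pvCtx Z k a, pvZ Z a))).countP
                  (fun q => q.1 == pvCtx Z k j && q.2 == 0) : Int)
           then 1 else 0)
      else Y) =
      (fun (Y : List Int) (j : Int) =>
        if pvZ Z j = 2 then PySem.List.pySetD Y j (pvGB Z k j) else Y) := by
    funext Y j
    rw [List.countP_map, List.countP_map]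
    unfold pvZ pvGB pvCnt0 pvCnt1
    rfl
  rw [hbody, pvFoldFilter]

-- ===== VERDICT (by name: the statement is the Claim_ definition above) =====
theorem DUDEBEC_spec : Claim_equal_DUDEBEC := by
  intro Z k _ hpre
  obtain ⟨hk0, hkn⟩ := hpre
  unfold Spec_DUDEBEC
  rw [DUDEBEC_eq, DUDEBEC_alt_eq Z k hk0 hkn]
  have hR : ∀ i ∈ PySem.List.pyRange k ((Z.length : Int) - k) 1, 0 ≤ i ∧ i < (Z.length : Int) := by
    intro i hi; rw [PySem.List.mem_pyRange_one] at hi; omega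
  have hR1 : ∀ i ∈ PySem.List.pyRange 0 k 1, 0 ≤ i ∧ i < (Z.length : Int) := by
    intro i hi; rw [PySem.List.mem_pyRange_one] at hi; omega
  have hR2 : ∀ i ∈ PySem.List.pyRange ((Z.length : Int) - k) (Z.length : Int) 1,
      0 ≤ i ∧ i < (Z.length : Int) := by
    intro i hi; rw [PySem.List.mem_pyRange_one] at hi; omega
  have hRf : ∀ i ∈ (PySem.List.pyRange k ((Z.length : Int) - k) 1).filter
      (fun j => decide (pvZ Z j = 2)), 0 ≤ i ∧ i < (Z.length : Int) := by
    intro i hi; exact hR i (List.mem_filter.mp hi).1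
  have hlen1 : (pvSetFold (pvG0 Z) (PySem.List.pyRange 0 k 1) (List.replicate Z.length 0)).length
      = Z.length := by rw [pvSetFold_length]; simp
  have hlen2 : (pvSetFold (pvG0 Z) (PySem.List.pyRange ((Z.length : Int) - k) (Z.length : Int) 1)
      (pvSetFold (pvG0 Z) (PySem.List.pyRange 0 k 1) (List.replicate Z.length 0))).length
      = Z.length := by rw [pvSetFold_length]; exact hlen1
  have hlenB : ((PySem.List.enumerate Z 0).map (fun p =>
      if p.2 = 2 ∧ ¬ (k ≤ p.1 ∧ p.1 < (Z.length : Int) - k) then 0 else p.2)).length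
      = Z.length := by simp [PySem.List.length_enumerate]
  apply List.ext_getElem?
  intro m
  rw [pvSetFold_getElem? _ _ _ (by rw [hlen2]; exact hR) m,
      pvSetFold_getElem? _ _ _ (by rw [hlen1]; exact hR2) m,
      pvSetFold_getElem? _ _ _ (by simpa using hR1) m,
      pvSetFold_getElem? _ _ _ (by rw [hlenB]; exact hRf) m]
  by_cases hmn : m < Z.length
  · -- index inside the list
    have hYB : ((PySem.List.enumerate Z 0).map (fun p =>
        if p.2 = 2 ∧ ¬ (k ≤ p.1 ∧ p.1 < (Z.length : Int) - k) then 0 else p.2))[m]? =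
        some (if pvZ Z (m : Int) = 2 ∧ ¬ (k ≤ (m : Int) ∧ (m : Int) < (Z.length : Int) - k)
              then 0 else pvZ Z (m : Int)) := by
      rw [List.getElem?_map, PySem.List.getElem?_enumerate]
      rw [List.getElem?_eq_getElem hmn]
      simp only [Option.map_some]
      congr 1
      have : pvZ Z (m : Int) = Z[m] := by
        unfold pvZ
        rw [PySem.List.pyGetD_natCast, List.getD_eq_getElem?_getD, List.getElem?_eq_getElem hmn]
        rfl
      simp [this]
    have hrep : (List.replicate Z.length (0 : Int))[m]? = some 0 := by
      simp [hmn]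
    by_cases hin : k ≤ (m : Int) ∧ (m : Int) < (Z.length : Int) - k
    · have hmR : (m : Int) ∈ PySem.List.pyRange k ((Z.length : Int) - k) 1 :=
        PySem.List.mem_pyRange_one.mpr hin
      rw [if_pos hmR]
      by_cases h2 : pvZ Z (m : Int) = 2
      · have hmF : (m : Int) ∈ (PySem.List.pyRange k ((Z.length : Int) - k) 1).filter
            (fun j => decide (pvZ Z j = 2)) := List.mem_filter.mpr ⟨hmR, by simp [h2]⟩
        rw [if_pos hmF]
        -- both sides are the majority bit of context pvCtx Z k m over the interior
        have hA : (pvDA Z k).getD (pvCtx Z k (m : Int)) [] =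
            [pvCnt0 Z k (PySem.List.pyRange k ((Z.length : Int) - k) 1) (pvCtx Z k (m : Int)),
             pvCnt1 Z k (PySem.List.pyRange k ((Z.length : Int) - k) 1) (pvCtx Z k (m : Int))] := by
          have := pvStepA_fold_getD Z k (PySem.List.pyRange k ((Z.length : Int) - k) 1)
            PySem.Dict.empty (pvCtx Z k (m : Int)) 0 0
            (Or.inr ⟨by simp, rfl, rfl, List.mem_map_of_mem hmR⟩)
          simpa [pvDA] using this
        unfold pvGA pvGB pvMajA
        rw [if_pos h2, hA]
        simp [pysem]
      · have hmF : (m : Int) ∉ (PySem.List.pyRange k ((Z.length : Int) - k) 1).filter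
            (fun j => decide (pvZ Z j = 2)) := by
          intro hx; exact h2 (by simpa using (List.mem_filter.mp hx).2)
        rw [if_neg hmF, hYB]
        unfold pvGA
        rw [if_neg h2]
        congr 1
        simp [h2]
    · -- boundary position
      have hmR : (m : Int) ∉ PySem.List.pyRange k ((Z.length : Int) - k) 1 := by
        rw [PySem.List.mem_pyRange_one]; omega
      have hmF : (m : Int) ∉ (PySem.List.pyRange k ((Z.length : Int) - k) 1).filter
          (fun j => decide (pvZ Z j = 2)) := fun hx => hmR (List.mem_filter.mp hx).1
      rw [if_neg hmR, if_neg hmF, hYB]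
      have hval : (if pvZ Z (m : Int) = 2 ∧ ¬ (k ≤ (m : Int) ∧ (m : Int) < (Z.length : Int) - k)
          then (0 : Int) else pvZ Z (m : Int)) = pvG0 Z (m : Int) := by
        unfold pvG0; by_cases h2 : pvZ Z (m : Int) = 2 <;> simp [h2, hin]
      rw [hval]
      by_cases hm2 : (m : Int) ∈ PySem.List.pyRange ((Z.length : Int) - k) (Z.length : Int) 1
      · rw [if_pos hm2]
      · have hm1 : (m : Int) ∈ PySem.List.pyRange 0 k 1 := by
          rw [PySem.List.mem_pyRange_one]
          rw [PySem.List.mem_pyRange_one] at hm2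
          omega
        rw [if_neg hm2, if_pos hm1]
  · -- index past the end: both sides are none
    have hmR : (m : Int) ∉ PySem.List.pyRange k ((Z.length : Int) - k) 1 := by
      rw [PySem.List.mem_pyRange_one]; omega
    have hmF : (m : Int) ∉ (PySem.List.pyRange k ((Z.length : Int) - k) 1).filter
        (fun j => decide (pvZ Z j = 2)) := fun hx => hmR (List.mem_filter.mp hx).1
    have hm2 : (m : Int) ∉ PySem.List.pyRange ((Z.length : Int) - k) (Z.length : Int) 1 := by
      rw [PySem.List.mem_pyRange_one]; omega
    have hm1 : (m : Int) ∉ PySem.List.pyRange 0 k 1 := by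
      rw [PySem.List.mem_pyRange_one]; omega
    rw [if_neg hmR, if_neg hmF, if_neg hm2, if_neg hm1]
    rw [List.getElem?_eq_none (by simp; omega), List.getElem?_eq_none (by rw [hlenB]; omega)]
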